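-- pv_equiv track=rewrite | github.com/natsumezjr/attack-trace-analyzer | reports/scripts/tools/normalize_tex_headings.py | _normalize_label_escapes
-- ===== SOURCE A (Python) =====
-- def _find_matching_brace(line: str, start_idx: int) -> int | None:
--     """Given index after an opening '{', return index of its matching '}'."""
--     depth = 1
--     for idx in range(start_idx, len(line)):
--         ch = line[idx]
--         if ch == "{":
--             depth += 1
--         elif ch == "}":
--             depth -= 1
--             if depth == 0:
--                 return idx
--     return None
--
-- def _normalize_label_escapes(line: str) -> tuple[str, bool]:
--     if "\\label{" not in line or "\\\\x" not in line:
--         return line, False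
--
--     # Parse each \label{...} occurrence and rewrite only its argument.
--     idx = 0
--     changed = False
--     out = []
--     while True:
--         pos = line.find(r"\label{", idx)
--         if pos == -1:
--             out.append(line[idx:])
--             break
--         out.append(line[idx : pos + len(r"\label{")])
--         content_start = pos + len(r"\label{")
--         content_end = _find_matching_brace(line, content_start)
--         if content_end is None:
--             out.append(line[content_start:])
--             break
--         content = line[content_start:content_end]
--         new_content = content.replace(r"\\x", "ux")
--         if new_content != content:
--             changed = True
--         out.append(new_content)
--         out.append("}")
--         idx = content_end + 1
--
--     return "".join(out), changed
-- ===== SOURCE B (Python) =====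
-- def _normalize_label_escapes(line):
--     if "\\label{" not in line or "\\\\x" not in line:
--         return line, False
--
--     # Single left-to-right scan: copy chars until a "\label{" prefix, then
--     # brace-count the argument into a buffer and rewrite it on close.
--     out = []
--     changed = False
--     i = 0
--     n = len(line)
--     while i < n:
--         if line.startswith("\\label{", i):
--             out.append("\\label{")
--             j = i + 7
--             depth = 1
--             buf = []
--             while j < n:
--                 ch = line[j]
--                 if ch == "{":
--                     depth += 1
--                 elif ch == "}":
--                     depth -= 1
--                     if depth == 0:
--                         break
--                 buf.append(ch)
--                 j += 1
--             arg = "".join(buf)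
--             if depth == 0:
--                 new_arg = arg.replace("\\\\x", "ux")
--                 if new_arg != arg:
--                     changed = True
--                 out.append(new_arg)
--                 out.append("}")
--                 i = j + 1
--             else:
--                 out.append(arg)  # unmatched brace: emit untouched, stop scanning
--                 i = j
--         else:
--             out.append(line[i])
--             i += 1
--     return "".join(out), changed
-- ===== Notes on version B (the rewrite author's own statement) =====
-- stated objective: alternative
-- what changed: B replaces A's index bookkeeping (repeated str.find jumps plus a separate matching-brace helper over absolute indices) by a single explicit left-to-right character scan that detects the label prefix with startswith and brace-counts the argument into a buffer, rewriting it when the matching brace closes.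
import Mathlib
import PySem

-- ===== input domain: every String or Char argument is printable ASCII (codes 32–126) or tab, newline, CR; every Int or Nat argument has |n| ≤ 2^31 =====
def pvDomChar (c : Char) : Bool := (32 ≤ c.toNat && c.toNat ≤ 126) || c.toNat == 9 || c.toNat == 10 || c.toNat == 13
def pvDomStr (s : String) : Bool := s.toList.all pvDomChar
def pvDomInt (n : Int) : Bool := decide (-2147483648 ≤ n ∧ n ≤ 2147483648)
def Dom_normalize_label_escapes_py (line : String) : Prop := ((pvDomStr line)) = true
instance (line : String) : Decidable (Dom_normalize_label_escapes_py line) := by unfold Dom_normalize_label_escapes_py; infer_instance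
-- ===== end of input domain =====

-- B rewrites '\\x' escapes inside \label{...} arguments by a single left-to-right
-- character scan (startswith + brace counting) instead of A's find/find-matching-brace
-- index jumping; alternative decomposition, same exact behaviour.

-- ===== PORT A =====
-- _find_matching_brace: 'for idx in range(start_idx, len(line))' ported as structural
-- recursion over the suffix line.drop start, carrying the absolute index idx.
-- Python's int depth starts at 1, only ever decremented when ≥ 1 (the function returns
-- the moment it reaches 0), so a Nat depth with the test 'depth = 1' before the
-- decrement is exact.
def fmbAux : List Char → Nat → Nat → Option Nat
  | [], _, _ => none
  | c :: rest, idx, depth =>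
    if c = '{' then fmbAux rest (idx + 1) (depth + 1)
    else if c = '}' then
      (if depth = 1 then some idx else fmbAux rest (idx + 1) (depth - 1))
    else fmbAux rest (idx + 1) depth

def find_matching_brace (line : List Char) (start : Nat) : Option Nat :=
  fmbAux (line.drop start) start 1

-- the 'while True' loop of A: state (idx, changed, out); out is the flat concatenation
-- of A's appended pieces ('"".join(out)' is exactly that concatenation).
-- fuel = line.length + 1 always suffices: each iteration either returns or moves idx
-- strictly forward (idx ≤ content_end < len), proved in the equivalence lemmas below.
def aLoop : List Char → Nat → Nat → Bool → List Char → List Char × Bool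
  | _, 0, _, changed, out => (out, changed)  -- unreachable with the fuel supplied
  | l, fuel + 1, idx, changed, out =>
    let pos := PySem.Chars.findFrom l ("\\label{".toList) (idx : Int) none
    if pos = -1 then (out ++ PySem.List.slice l (some (idx : Int)) none, changed)
    else
      let p := pos.toNat
      let out2 := out ++ PySem.List.slice l (some (idx : Int)) (some ((p + 7 : Nat) : Int))
      match find_matching_brace l (p + 7) with
      | none => (out2 ++ PySem.List.slice l (some ((p + 7 : Nat) : Int)) none, changed)
      | some ce =>
        let content := PySem.List.slice l (some ((p + 7 : Nat) : Int)) (some ((ce : Nat) : Int))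
        let new_content := PySem.Chars.replace content ("\\\\x".toList) ("ux".toList)
        aLoop l fuel (ce + 1) (if new_content ≠ content then true else changed)
          (out2 ++ new_content ++ ['}'])

def normalize_label_escapes_py (line : String) : String × Bool :=
  if (!(PySem.Str.isIn "\\label{" line) || !(PySem.Str.isIn "\\\\x" line)) then (line, false)
  else
    (String.ofList (aLoop line.toList (line.toList.length + 1) 0 false []).1,
     (aLoop line.toList (line.toList.length + 1) 0 false []).2)

-- ===== PORT B =====
-- inner 'while j < n' scan of Source B: consumes the suffix after '\label{', counting
-- braces; returns the buffered argument chars and (some rest-after-the-matching-'}')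
-- or none if the scan ran off the end (unmatched brace).
def bArg : List Char → Nat → List Char × Option (List Char)
  | [], _ => ([], none)
  | c :: rest, depth =>
    if c = '{' then (c :: (bArg rest (depth + 1)).1, (bArg rest (depth + 1)).2)
    else if c = '}' then
      if depth = 1 then ([], some rest)
      else (c :: (bArg rest (depth - 1)).1, (bArg rest (depth - 1)).2)
    else (c :: (bArg rest depth).1, (bArg rest depth).2)

-- needed by bLoop's termination proof (cited in decreasing_by)
theorem bArg_some_shape : ∀ (s : List Char) (d : Nat) (b r : List Char),
    bArg s d = (b, some r) → s = b ++ '}' :: r := by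
  intro s
  induction s with
  | nil => intro d b r h; simp [bArg] at h
  | cons c rest ih =>
    intro d b r h
    by_cases h1 : c = '{'
    · cases heq : bArg rest (d + 1) with
      | mk b' r' =>
        simp [bArg, h1, heq] at h
        obtain ⟨hb, hr⟩ := h
        subst hr
        have := ih (d + 1) b' r heq
        simp [← hb, h1, this]
    · by_cases h2 : c = '}'
      · by_cases h3 : d = 1
        · simp [bArg, h1, h2, h3] at h
          obtain ⟨hb, hr⟩ := h
          simp [← hb, ← hr, h2]
        · cases heq : bArg rest (d - 1) with
          | mk b' r' =>
            simp [bArg, h1, h2, h3, heq] at h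
            obtain ⟨hb, hr⟩ := h
            subst hr
            have := ih (d - 1) b' r heq
            simp [← hb, h2, this]
      · cases heq : bArg rest d with
        | mk b' r' =>
          simp [bArg, h1, h2, heq] at h
          obtain ⟨hb, hr⟩ := h
          subst hr
          have := ih d b' r heq
          simp [← hb, this]

-- outer 'while i < n' scan of Source B
def bLoop : List Char → Bool → List Char × Bool
  | [], changed => ([], changed)
  | c :: rest, changed =>
    if PySem.Chars.startswith (c :: rest) ("\\label{".toList) then
      match hb : bArg ((c :: rest).drop 7) 1 with
      | (buf, none) => ("\\label{".toList ++ buf, changed)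
      | (buf, some r) =>
        let nc := PySem.Chars.replace buf ("\\\\x".toList) ("ux".toList)
        let changed' := if nc ≠ buf then true else changed
        ("\\label{".toList ++ nc ++ '}' :: (bLoop r changed').1, (bLoop r changed').2)
    else
      (c :: (bLoop rest changed).1, (bLoop rest changed).2)
termination_by s _ => s.length
decreasing_by
  · have hsh := bArg_some_shape _ _ _ _ hb
    have hlen : (List.drop 7 (c :: rest)).length = buf.length + 1 + r.length := by
      rw [hsh]; simp; omega
    simp only [List.length_drop, List.length_cons] at hlen ⊢
    omega
  · simp

def normalize_label_escapes_py_alt (line : String) : String × Bool :=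
  if (!(PySem.Str.isIn "\\label{" line) || !(PySem.Str.isIn "\\\\x" line)) then (line, false)
  else
    (String.ofList (bLoop line.toList false).1, (bLoop line.toList false).2)

-- ===== PRECONDITION & SPEC =====
def Spec_normalize_label_escapes_py (line : String) (out : String × Bool) : Prop := out = normalize_label_escapes_py_alt line
instance (line : String) (out : String × Bool) : Decidable (Spec_normalize_label_escapes_py line out) := by unfold Spec_normalize_label_escapes_py; infer_instance

-- ===== CLAIM (what is proved, stated in full; the proofs are below) =====
def Claim_equal_normalize_label_escapes_py : Prop := ∀ (line : String), Dom_normalize_label_escapes_py line → Spec_normalize_label_escapes_py line (normalize_label_escapes_py line)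

-- ===== LEMMAS AND PROOFS =====

theorem bArg_none_shape : ∀ (s : List Char) (d : Nat) (b : List Char),
    bArg s d = (b, none) → b = s := by
  intro s
  induction s with
  | nil => intro d b h; simp [bArg] at h; simp [h]
  | cons c rest ih =>
    intro d b h
    by_cases h1 : c = '{'
    · cases heq : bArg rest (d + 1) with
      | mk b' r' =>
        simp [bArg, h1, heq] at h
        obtain ⟨hb, hr⟩ := h
        subst hr
        simp [← hb, h1, ih (d + 1) b' heq]
    · by_cases h2 : c = '}'
      · by_cases h3 : d = 1
        · simp [bArg, h1, h2, h3] at h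
        · cases heq : bArg rest (d - 1) with
          | mk b' r' =>
            simp [bArg, h1, h2, h3, heq] at h
            obtain ⟨hb, hr⟩ := h
            subst hr
            simp [← hb, h2, ih (d - 1) b' heq]
      · cases heq : bArg rest d with
        | mk b' r' =>
          simp [bArg, h1, h2, heq] at h
          obtain ⟨hb, hr⟩ := h
          subst hr
          simp [← hb, ih d b' heq]

-- fmbAux agrees with bArg: same scan, fmbAux reports the absolute index of the
-- matching '}' instead of the buffered content.
theorem fmb_of_bArg_none : ∀ (s : List Char) (idx d : Nat) (b : List Char),
    bArg s d = (b, none) → fmbAux s idx d = none := by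
  intro s
  induction s with
  | nil => intro idx d b _; simp [fmbAux]
  | cons c rest ih =>
    intro idx d b h
    by_cases h1 : c = '{'
    · cases heq : bArg rest (d + 1) with
      | mk b' r' =>
        simp [bArg, h1, heq] at h
        obtain ⟨hb, hr⟩ := h
        subst hr
        simp [fmbAux, h1, ih (idx + 1) (d + 1) b' heq]
    · by_cases h2 : c = '}'
      · by_cases h3 : d = 1
        · simp [bArg, h1, h2, h3] at h
        · cases heq : bArg rest (d - 1) with
          | mk b' r' =>
            simp [bArg, h1, h2, h3, heq] at h
            obtain ⟨hb, hr⟩ := h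
            subst hr
            simp [fmbAux, h1, h2, h3, ih (idx + 1) (d - 1) b' heq]
      · cases heq : bArg rest d with
        | mk b' r' =>
          simp [bArg, h1, h2, heq] at h
          obtain ⟨hb, hr⟩ := h
          subst hr
          simp [fmbAux, h1, h2, ih (idx + 1) d b' heq]

theorem fmb_of_bArg_some : ∀ (s : List Char) (idx d : Nat) (b r : List Char),
    bArg s d = (b, some r) → fmbAux s idx d = some (idx + b.length) := by
  intro s
  induction s with
  | nil => intro idx d b r h; simp [bArg] at h
  | cons c rest ih =>
    intro idx d b r h
    by_cases h1 : c = '{'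
    · cases heq : bArg rest (d + 1) with
      | mk b' r' =>
        simp [bArg, h1, heq] at h
        obtain ⟨hb, hr⟩ := h
        subst hr
        simp [fmbAux, h1, ih (idx + 1) (d + 1) b' r heq, ← hb]
        omega
    · by_cases h2 : c = '}'
      · by_cases h3 : d = 1
        · simp [bArg, h1, h2, h3] at h
          obtain ⟨hb, hr⟩ := h
          simp [fmbAux, h1, h2, h3, ← hb, ← hr]
        · cases heq : bArg rest (d - 1) with
          | mk b' r' =>
            simp [bArg, h1, h2, h3, heq] at h
            obtain ⟨hb, hr⟩ := h
            subst hr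
            simp [fmbAux, h1, h2, h3, ih (idx + 1) (d - 1) b' r heq, ← hb]
            omega
      · cases heq : bArg rest d with
        | mk b' r' =>
          simp [bArg, h1, h2, heq] at h
          obtain ⟨hb, hr⟩ := h
          subst hr
          simp [fmbAux, h1, h2, ih (idx + 1) d b' r heq, ← hb]
          omega

theorem bLoop_no_occ : ∀ (s : List Char) (changed : Bool),
    ¬ ("\\label{".toList <:+: s) → bLoop s changed = (s, changed) := by
  intro s
  induction s with
  | nil => intro changed _; rw [bLoop]
  | cons c rest ih =>
    intro changed h
    rw [bLoop]
    have hnp : ¬ PySem.Chars.startswith (c :: rest) ("\\label{".toList) = true := by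
      rw [PySem.Chars.startswith_iff]
      intro hp
      exact h hp.isInfix
    rw [if_neg hnp, ih changed (fun hi => h (List.infix_cons hi))]

theorem bLoop_label_none (s' buf : List Char) (hb : bArg s' 1 = (buf, none)) (changed : Bool) :
    bLoop ("\\label{".toList ++ s') changed = ("\\label{".toList ++ buf, changed) := by
  rw [show ("\\label{".toList ++ s') = '\\' :: (['l', 'a', 'b', 'e', 'l', '{'] ++ s') from rfl]
  rw [bLoop]
  have hsw : PySem.Chars.startswith ('\\' :: (['l', 'a', 'b', 'e', 'l', '{'] ++ s'))
      ("\\label{".toList) = true := by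
    rw [PySem.Chars.startswith_iff]
    exact ⟨s', rfl⟩
  rw [if_pos hsw]
  have hd7 : List.drop 7 ('\\' :: (['l', 'a', 'b', 'e', 'l', '{'] ++ s')) = s' := rfl
  split
  case _ b0 heq =>
    rw [hd7, hb] at heq
    injection heq with h1 h2
    subst h1
    rfl
  case _ b0 r0 heq =>
    rw [hd7, hb] at heq
    injection heq with h1 h2
    simp at h2

theorem bLoop_label_some (s' buf r : List Char) (hb : bArg s' 1 = (buf, some r)) (changed : Bool) :
    bLoop ("\\label{".toList ++ s') changed =
      ("\\label{".toList ++ PySem.Chars.replace buf ("\\\\x".toList) ("ux".toList) ++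
        '}' :: (bLoop r (if PySem.Chars.replace buf ("\\\\x".toList) ("ux".toList) ≠ buf then true else changed)).1,
       (bLoop r (if PySem.Chars.replace buf ("\\\\x".toList) ("ux".toList) ≠ buf then true else changed)).2) := by
  rw [show ("\\label{".toList ++ s') = '\\' :: (['l', 'a', 'b', 'e', 'l', '{'] ++ s') from rfl]
  rw [bLoop]
  have hsw : PySem.Chars.startswith ('\\' :: (['l', 'a', 'b', 'e', 'l', '{'] ++ s'))
      ("\\label{".toList) = true := by
    rw [PySem.Chars.startswith_iff]
    exact ⟨s', rfl⟩
  rw [if_pos hsw]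
  have hd7 : List.drop 7 ('\\' :: (['l', 'a', 'b', 'e', 'l', '{'] ++ s')) = s' := rfl
  split
  case _ b0 heq =>
    rw [hd7, hb] at heq
    injection heq with h1 h2
    simp at h2
  case _ b0 r0 heq =>
    rw [hd7, hb] at heq
    injection heq with h1 h2
    injection h2 with h2
    subst h1
    subst h2
    rfl

theorem bLoop_peel : ∀ (k : Nat) (s : List Char) (changed : Bool),
    k ≤ s.length → (∀ i, i < k → ¬ ("\\label{".toList <+: s.drop i)) →
    bLoop s changed = (s.take k ++ (bLoop (s.drop k) changed).1, (bLoop (s.drop k) changed).2) := by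
  intro k
  induction k with
  | zero => intro s changed _ _; simp
  | succ k ih =>
    intro s changed hk h
    match s with
    | [] => simp at hk
    | c :: rest =>
      rw [bLoop]
      have hnp : ¬ PySem.Chars.startswith (c :: rest) ("\\label{".toList) = true := by
        rw [PySem.Chars.startswith_iff]
        have := h 0 (by omega)
        simpa using this
      rw [if_neg hnp]
      rw [ih rest changed (by simpa using hk) (fun i hi => by simpa using h (i + 1) (by omega))]
      simp [List.take_succ_cons, List.drop_succ_cons]

theorem aLoop_eq_bLoop : ∀ (fuel : Nat) (l : List Char) (idx : Nat) (changed : Bool) (out : List Char),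
    idx ≤ l.length → l.length - idx < fuel →
    aLoop l fuel idx changed out =
      (out ++ (bLoop (l.drop idx) changed).1, (bLoop (l.drop idx) changed).2) := by
  intro fuel
  induction fuel with
  | zero => intro l idx changed out hk hf; omega
  | succ fuel ih =>
    intro l idx changed out hk hf
    simp only [aLoop]
    rw [PySem.Chars.findFrom_natCast l _ idx hk]
    by_cases hfind : PySem.Chars.find (l.drop idx) ("\\label{".toList) = -1
    · rw [if_pos hfind, if_pos rfl, PySem.List.slice_from_natCast,
        bLoop_no_occ _ _ ((PySem.Chars.find_eq_neg_one_iff _ _).mp hfind)]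
    · rw [if_neg hfind]
      have h0 : 0 ≤ PySem.Chars.find (l.drop idx) ("\\label{".toList) := by
        have := PySem.Chars.neg_one_le_find (l.drop idx) ("\\label{".toList)
        omega
      have hspec := PySem.Chars.find_spec h0
      have hkle0 := PySem.Chars.find_le_length (l.drop idx) ("\\label{".toList)
      obtain ⟨k, hkF⟩ : ∃ k : Nat, PySem.Chars.find (l.drop idx) ("\\label{".toList) = (k : Int) :=
        ⟨_, (Int.toNat_of_nonneg h0).symm⟩
      rw [hkF] at hspec hkle0 ⊢
      simp only [Int.toNat_natCast] at hspec
      obtain ⟨hpre, hmin⟩ := hspec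
      have hkle : k ≤ (l.drop idx).length := by exact_mod_cast hkle0
      rw [if_neg (by omega : ¬ ((idx : Int) + (k : Int) = -1))]
      have htn : (((idx : Int) + (k : Int)).toNat) = idx + k := by omega
      rw [htn]
      obtain ⟨t, ht⟩ := hpre
      have ht2 : t = (l.drop idx).drop (k + 7) := by
        rw [← List.drop_drop, ← ht,
          List.drop_left' (show ("\\label{".toList).length = 7 from rfl)]
      have hdropk : (l.drop idx).drop k = "\\label{".toList ++ (l.drop idx).drop (k + 7) := by
        rw [← ht2, ht]
      have hds : l.drop (idx + k + 7) = (l.drop idx).drop (k + 7) := by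
        rw [List.drop_drop]
        congr 1 <;> omega
      have hlen1 : (l.drop idx).length = l.length - idx := List.length_drop
      have hlen2 : ((l.drop idx).drop k).length = 7 + ((l.drop idx).drop (k + 7)).length := by
        rw [hdropk]
        simp <;> omega
      have hfmb : find_matching_brace l (idx + k + 7) =
          fmbAux ((l.drop idx).drop (k + 7)) (idx + k + 7) 1 := by
        rw [find_matching_brace, hds]
      rw [bLoop_peel k (l.drop idx) changed (by omega) hmin, hdropk]
      have htk : (l.drop idx).take (k + 7) = (l.drop idx).take k ++ "\\label{".toList := by
        rw [List.take_add, hdropk]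
        congr 1 <;> rfl
      cases hb : bArg ((l.drop idx).drop (k + 7)) 1 with
      | mk buf ro =>
        cases ro with
        | none =>
          rw [hfmb, fmb_of_bArg_none _ _ 1 buf hb]
          rw [bLoop_label_none _ buf hb]
          have hbuf : buf = (l.drop idx).drop (k + 7) := bArg_none_shape _ 1 buf hb
          rw [PySem.List.slice_natCast, PySem.List.slice_from_natCast, hds,
            (by omega : idx + k + 7 - idx = k + 7), htk, hbuf]
          simp
        | some r =>
          rw [hfmb, fmb_of_bArg_some _ _ 1 buf r hb]
          rw [bLoop_label_some _ buf r hb]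
          have hshape := bArg_some_shape _ 1 buf r hb
          have hlen3 : ((l.drop idx).drop (k + 7)).length = buf.length + 1 + r.length := by
            rw [hshape]
            simp <;> omega
          have hL1 : ((l.drop idx).drop k).length = (l.drop idx).length - k := by
            simp <;> omega
          have hL2 : ((l.drop idx).drop (k + 7)).length = (l.drop idx).length - (k + 7) := by
            simp <;> omega
          have hLL : l.length = idx + k + 7 + buf.length + 1 + r.length := by omega
          simp only [PySem.List.slice_natCast]
          rw [hds, (by omega : idx + k + 7 - idx = k + 7), htk,
            (by omega : idx + k + 7 + buf.length - (idx + k + 7) = buf.length)]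
          have hcontent : ((l.drop idx).drop (k + 7)).take buf.length = buf := by
            rw [hshape]
            exact List.take_left' rfl
          rw [hcontent]
          have hr : l.drop (idx + k + 7 + buf.length + 1) = r := by
            rw [show idx + k + 7 + buf.length + 1 = (idx + k + 7) + (buf.length + 1) by omega,
              ← List.drop_drop, hds, hshape,
              show buf ++ '}' :: r = (buf ++ ['}']) ++ r by simp,
              List.drop_left' (by simp)]
          rw [ih l (idx + k + 7 + buf.length + 1) _ _ (by omega) (by omega), hr]
          simp

-- ===== VERDICT (by name: the statement is the Claim_ definition above) =====
theorem normalize_label_escapes_py_spec : Claim_equal_normalize_label_escapes_py := by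
  unfold Claim_equal_normalize_label_escapes_py Spec_normalize_label_escapes_py
  intro line _
  unfold normalize_label_escapes_py normalize_label_escapes_py_alt
  by_cases hg : (!(PySem.Str.isIn "\\label{" line) || !(PySem.Str.isIn "\\\\x" line)) = true
  · rw [if_pos hg, if_pos hg]
  · rw [if_neg hg, if_neg hg]
    rw [aLoop_eq_bLoop (line.toList.length + 1) line.toList 0 false [] (by omega) (by omega)]
    simp
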